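-- pv_equiv track=rewrite | github.com/Truemachinery/Crownwood | scripts/prune_roles.py | score_dept_relevance
-- ===== SOURCE A (Python) =====
-- DEPT_RELEVANCE = {
--     "public works": 10, "road and bridge": 10, "road & bridge": 10,
--     "road bridge": 10, "streets": 10, "commissioner": 10,
--     "county commissioner": 10, "city commissioner": 10,
--     "precinct": 10, "pct": 10, "engineering": 9, "county engineer": 10, "city engineer": 10,
--     "transportation": 5, "infrastructure": 5, "highway": 5, "maintenance": 5,
--     "fleet": 3, "utilities": 3, "parks": 3, "facilities": 3,
--     "purchasing": 0, "procurement": 0, "administration": 0, "county judge": 0,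
--     "city manager": 0, "general": 0, "mayor": 0, "clerk": 0, "auditor": 0,
-- }
--
-- def score_dept_relevance(email, title, department):
--     """Score how relevant this contact is for our products."""
--     text = f"{email or ''} {title or ''} {department or ''}".lower()
--     best = 0
--
--     # Try exact matches or substring matches for the good stuff
--     for dept, score in DEPT_RELEVANCE.items():
--         if dept in text:
--             if score > best:
--                 best = score
--
--     # If no strict match but we have points
--     return best
-- ===== SOURCE B (Python) =====
-- # Tiered keyword lists, highest tier first; first tier with any matching keyword wins.
-- _TIERS = [
--     (10, ("public works", "road and bridge", "road & bridge", "road bridge",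
--           "streets", "commissioner", "county commissioner", "city commissioner",
--           "precinct", "pct", "county engineer", "city engineer")),
--     (9, ("engineering",)),
--     (5, ("transportation", "infrastructure", "highway", "maintenance")),
--     (3, ("fleet", "utilities", "parks", "facilities")),
-- ]
--
-- def score_dept_relevance(email, title, department):
--     """Score how relevant this contact is for our products."""
--     text = " ".join((email or "", title or "", department or "")).lower()
--     for score, keywords in _TIERS:
--         if any(kw in text for kw in keywords):
--             return score
--     return 0
-- ===== Notes on version B (the rewrite author's own statement) =====
-- stated objective: alternative
-- what changed: B replaces A's full scan over a flat pattern->score dict with a running max by a tier table (score, keyword-list) ordered high-to-low: it returns the score of the first tier containing any matching keyword (0 otherwise), dropping the zero-score patterns that can never affect the max.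
import Mathlib
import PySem

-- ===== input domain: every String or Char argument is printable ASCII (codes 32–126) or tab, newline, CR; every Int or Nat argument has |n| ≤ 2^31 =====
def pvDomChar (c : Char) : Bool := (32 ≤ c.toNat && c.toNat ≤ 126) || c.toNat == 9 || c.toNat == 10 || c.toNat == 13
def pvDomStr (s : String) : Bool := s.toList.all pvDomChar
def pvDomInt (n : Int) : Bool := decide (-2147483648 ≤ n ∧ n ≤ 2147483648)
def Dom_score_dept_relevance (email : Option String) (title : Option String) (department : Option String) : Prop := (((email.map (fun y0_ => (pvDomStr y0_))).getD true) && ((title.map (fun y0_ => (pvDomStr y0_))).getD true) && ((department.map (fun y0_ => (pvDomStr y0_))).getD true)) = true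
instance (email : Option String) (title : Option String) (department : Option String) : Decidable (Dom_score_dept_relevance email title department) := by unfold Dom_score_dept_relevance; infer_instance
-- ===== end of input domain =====

-- B replaces A's full dict scan with a running max by a high-to-low tier table
-- (score, keywords): first tier with a matching keyword wins; zero-score patterns
-- are dropped as they never affect the max.  Equal return value proved on all inputs.

-- ===== PORT A =====
-- DEPT_RELEVANCE.items(): the dict literal has 30 distinct keys, so items() is this list in order.
def deptPairs : List (String × Int) :=
  [("public works", 10), ("road and bridge", 10), ("road & bridge", 10),
   ("road bridge", 10), ("streets", 10), ("commissioner", 10),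
   ("county commissioner", 10), ("city commissioner", 10),
   ("precinct", 10), ("pct", 10), ("engineering", 9), ("county engineer", 10), ("city engineer", 10),
   ("transportation", 5), ("infrastructure", 5), ("highway", 5), ("maintenance", 5),
   ("fleet", 3), ("utilities", 3), ("parks", 3), ("facilities", 3),
   ("purchasing", 0), ("procurement", 0), ("administration", 0), ("county judge", 0),
   ("city manager", 0), ("general", 0), ("mayor", 0), ("clerk", 0), ("auditor", 0)]

def score_dept_relevance (email : Option String) (title : Option String) (department : Option String) : Int :=
  -- f"{email or ''} {title or ''} {department or ''}".lower()  (for Optional[str] args, `x or ''` is `x.getD ""`)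
  let text := PySem.Chars.lower
    ((email.getD "").toList ++ ' ' :: (title.getD "").toList ++ ' ' :: (department.getD "").toList)
  deptPairs.foldl (fun best p =>
    if PySem.Chars.isIn p.1.toList text then (if p.2 > best then p.2 else best) else best) 0

-- ===== PORT B =====
def kw10 : List String :=
  ["public works", "road and bridge", "road & bridge", "road bridge",
   "streets", "commissioner", "county commissioner", "city commissioner",
   "precinct", "pct", "county engineer", "city engineer"]
def kw9 : List String := ["engineering"]
def kw5 : List String := ["transportation", "infrastructure", "highway", "maintenance"]
def kw3 : List String := ["fleet", "utilities", "parks", "facilities"]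

def tierTable : List (Int × List String) := [(10, kw10), (9, kw9), (5, kw5), (3, kw3)]

-- any(kw in text for kw in keywords)
def anyKw (text : List Char) (kws : List String) : Bool :=
  kws.any (fun k => PySem.Chars.isIn k.toList text)

-- the early-returning for-loop over the tier table
def tierLoop (text : List Char) : List (Int × List String) → Int
  | [] => 0
  | (s, kws) :: rest => if anyKw text kws then s else tierLoop text rest

def score_dept_relevance_alt (email : Option String) (title : Option String) (department : Option String) : Int :=
  -- " ".join((email or "", title or "", department or "")).lower()
  let text := PySem.Chars.lower
    (PySem.Chars.join [' '] [(email.getD "").toList, (title.getD "").toList, (department.getD "").toList])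
  tierLoop text tierTable

-- ===== PRECONDITION & SPEC =====
def Spec_score_dept_relevance (email : Option String) (title : Option String) (department : Option String) (out : Int) : Prop := out = score_dept_relevance_alt email title department
instance (email : Option String) (title : Option String) (department : Option String) (out : Int) : Decidable (Spec_score_dept_relevance email title department out) := by unfold Spec_score_dept_relevance; infer_instance

-- ===== CLAIM (what is proved, stated in full; the proofs are below) =====
def Claim_equal_score_dept_relevance : Prop := ∀ (email : Option String) (title : Option String) (department : Option String), Dom_score_dept_relevance email title department → Spec_score_dept_relevance email title department (score_dept_relevance email title department)

-- ===== LEMMAS AND PROOFS =====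

-- the two text builders produce the same character list
theorem join_three (a b c : List Char) :
    PySem.Chars.join [' '] [a, b, c] = a ++ ' ' :: b ++ ' ' :: c := by
  simp [PySem.Chars.join, List.intercalate]

-- A's loop is a fold of max over the scores of the matching patterns.
theorem foldA_eq_foldl_max (text : List Char) (ps : List (String × Int)) (b : Int) :
    ps.foldl (fun best p =>
      if PySem.Chars.isIn p.1.toList text then (if p.2 > best then p.2 else best) else best) b
    = ((ps.filter (fun p => PySem.Chars.isIn p.1.toList text)).map Prod.snd).foldl max b := by
  induction ps generalizing b with
  | nil => rfl
  | cons p rest ih =>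
    by_cases h : PySem.Chars.isIn p.1.toList text = true
    · simp [List.foldl, List.filter, h, ih]
      have : (if p.2 > b then p.2 else b) = max b p.2 := by
        simp [max_def]; omega
      rw [this]
    · simp [List.foldl, List.filter, h, ih]

theorem foldl_max_le_init (l : List Int) (b : Int) : b ≤ l.foldl max b := by
  induction l generalizing b with
  | nil => simp
  | cons x t ih => exact le_trans (le_max_left b x) (ih (max b x))

theorem le_foldl_max (l : List Int) (b x : Int) (hx : x ∈ l) : x ≤ l.foldl max b := by
  induction l generalizing b with
  | nil => cases hx
  | cons y t ih =>
    rcases List.mem_cons.mp hx with rfl | h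
    · exact le_trans (le_max_right b x) (foldl_max_le_init t (max b x))
    · exact ih (max b y) h

theorem foldl_max_mem (l : List Int) (b : Int) : l.foldl max b = b ∨ l.foldl max b ∈ l := by
  induction l generalizing b with
  | nil => left; rfl
  | cons x t ih =>
    rcases ih (max b x) with h | h
    · rcases max_choice b x with hm | hm
      · left; rw [List.foldl_cons, h, hm]
      · right; rw [List.foldl_cons, h, hm]; exact List.mem_cons_self
    · right; exact List.mem_cons_of_mem _ h

theorem foldl_max_eq (l : List Int) (s : Int) (hs : s ∈ l) (hub : ∀ x ∈ l, x ≤ s)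
    (h0 : 0 ≤ s) : l.foldl max 0 = s := by
  refine le_antisymm ?_ (le_foldl_max l 0 s hs)
  rcases foldl_max_mem l 0 with h | h
  · omega
  · exact hub _ h

-- membership in the matched-score list
theorem mem_scores_iff (text : List Char) (x : Int) :
    (x ∈ ((deptPairs.filter (fun p => PySem.Chars.isIn p.1.toList text)).map Prod.snd)) ↔
    ∃ p ∈ deptPairs, PySem.Chars.isIn p.1.toList text = true ∧ p.2 = x := by
  simp [List.mem_map, List.mem_filter]

theorem anyKw_iff (text : List Char) (kws : List String) :
    anyKw text kws = true ↔ ∃ k ∈ kws, PySem.Chars.isIn k.toList text = true := by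
  simp [anyKw]

-- structural facts about the two tables (checked by the kernel)
theorem scores_cases : ∀ p ∈ deptPairs, p.2 = 10 ∨ p.2 = 9 ∨ p.2 = 5 ∨ p.2 = 3 ∨ p.2 = 0 := by decide
theorem key10 : ∀ p ∈ deptPairs, p.2 = 10 → p.1 ∈ kw10 := by decide
theorem key9 : ∀ p ∈ deptPairs, p.2 = 9 → p.1 ∈ kw9 := by decide
theorem key5 : ∀ p ∈ deptPairs, p.2 = 5 → p.1 ∈ kw5 := by decide
theorem key3 : ∀ p ∈ deptPairs, p.2 = 3 → p.1 ∈ kw3 := by decide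
theorem rev10 : ∀ k ∈ kw10, (k, (10:Int)) ∈ deptPairs := by decide
theorem rev9 : ∀ k ∈ kw9, (k, (9:Int)) ∈ deptPairs := by decide
theorem rev5 : ∀ k ∈ kw5, (k, (5:Int)) ∈ deptPairs := by decide
theorem rev3 : ∀ k ∈ kw3, (k, (3:Int)) ∈ deptPairs := by decide

-- the heart: A's max over matching scores equals B's tiered first hit
theorem max_eq_tier (text : List Char) :
    ((deptPairs.filter (fun p => PySem.Chars.isIn p.1.toList text)).map Prod.snd).foldl max 0
    = tierLoop text tierTable := by
  set S := (deptPairs.filter (fun p => PySem.Chars.isIn p.1.toList text)).map Prod.snd with hS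
  have no_tier : ∀ (s : Int) (kws : List String), anyKw text kws = false →
      (∀ p ∈ deptPairs, p.2 = s → p.1 ∈ kws) → ∀ x ∈ S, x ≠ s := by
    intro s kws hno hk x hx hxs
    obtain ⟨p, hp, hm, hps⟩ := (mem_scores_iff text x).mp hx
    have : p.1 ∈ kws := hk p hp (hps.trans hxs)
    have : anyKw text kws = true := (anyKw_iff text kws).mpr ⟨p.1, this, hm⟩
    simp [hno] at this
  have in_tier : ∀ (s : Int) (kws : List String), anyKw text kws = true →
      (∀ k ∈ kws, (k, s) ∈ deptPairs) → s ∈ S := by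
    intro s kws hyes hk
    obtain ⟨k, hkm, hin⟩ := (anyKw_iff text kws).mp hyes
    exact (mem_scores_iff text s).mpr ⟨(k, s), hk k hkm, hin, rfl⟩
  by_cases h10 : anyKw text kw10 = true
  · rw [show tierLoop text tierTable = 10 by simp [tierLoop, tierTable, h10]]
    refine foldl_max_eq S 10 (in_tier 10 kw10 h10 rev10) ?_ (by omega)
    intro x hx
    obtain ⟨p, hp, _, hps⟩ := (mem_scores_iff text x).mp hx
    rcases scores_cases p hp with h | h | h | h | h <;> omega
  · have h10' : anyKw text kw10 = false := by simpa using h10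
    by_cases h9 : anyKw text kw9 = true
    · rw [show tierLoop text tierTable = 9 by simp [tierLoop, tierTable, h10', h9]]
      refine foldl_max_eq S 9 (in_tier 9 kw9 h9 rev9) ?_ (by omega)
      intro x hx
      have hne10 := no_tier 10 kw10 h10' key10 x hx
      obtain ⟨p, hp, _, hps⟩ := (mem_scores_iff text x).mp hx
      rcases scores_cases p hp with h | h | h | h | h <;> omega
    · have h9' : anyKw text kw9 = false := by simpa using h9
      by_cases h5 : anyKw text kw5 = true
      · rw [show tierLoop text tierTable = 5 by simp [tierLoop, tierTable, h10', h9', h5]]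
        refine foldl_max_eq S 5 (in_tier 5 kw5 h5 rev5) ?_ (by omega)
        intro x hx
        have hne10 := no_tier 10 kw10 h10' key10 x hx
        have hne9 := no_tier 9 kw9 h9' key9 x hx
        obtain ⟨p, hp, _, hps⟩ := (mem_scores_iff text x).mp hx
        rcases scores_cases p hp with h | h | h | h | h <;> omega
      · have h5' : anyKw text kw5 = false := by simpa using h5
        by_cases h3 : anyKw text kw3 = true
        · rw [show tierLoop text tierTable = 3 by simp [tierLoop, tierTable, h10', h9', h5', h3]]
          refine foldl_max_eq S 3 (in_tier 3 kw3 h3 rev3) ?_ (by omega)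
          intro x hx
          have hne10 := no_tier 10 kw10 h10' key10 x hx
          have hne9 := no_tier 9 kw9 h9' key9 x hx
          have hne5 := no_tier 5 kw5 h5' key5 x hx
          obtain ⟨p, hp, _, hps⟩ := (mem_scores_iff text x).mp hx
          rcases scores_cases p hp with h | h | h | h | h <;> omega
        · have h3' : anyKw text kw3 = false := by simpa using h3
          rw [show tierLoop text tierTable = 0 by simp [tierLoop, tierTable, h10', h9', h5', h3']]
          rcases foldl_max_mem S 0 with h | h
          · exact h
          · have hne10 := no_tier 10 kw10 h10' key10 _ h
            have hne9 := no_tier 9 kw9 h9' key9 _ h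
            have hne5 := no_tier 5 kw5 h5' key5 _ h
            have hne3 := no_tier 3 kw3 h3' key3 _ h
            obtain ⟨p, hp, _, hps⟩ := (mem_scores_iff text _).mp h
            rcases scores_cases p hp with hc | hc | hc | hc | hc <;> omega

-- ===== VERDICT (by name: the statement is the Claim_ definition above) =====
theorem score_dept_relevance_spec : Claim_equal_score_dept_relevance := by
  intro email title department _
  unfold Spec_score_dept_relevance score_dept_relevance score_dept_relevance_alt
  rw [join_three]
  exact (foldA_eq_foldl_max _ _ 0).trans (max_eq_tier _)
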